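-- pv_equiv track=rewrite | github.com/CarlosHndz/Python_Exercises | R1-4.py | sum_of_sqrs
-- ===== SOURCE A (Python) =====
-- def sum_of_sqrs(k):
--     if k >= 0:
--         sqr_sum = 0
--         while k > 0:
--             count = k - 1
--             count *= count
--             sqr_sum += count
--             k -= 1
--         return sqr_sum
--     else:
--         return False
-- ===== SOURCE B (Python) =====
-- def sum_of_sqrs(k):
--     if k >= 0:
--         return (k - 1) * k * (2 * k - 1) // 6
--     else:
--         return False
-- ===== Notes on version B (the rewrite author's own statement) =====
-- stated objective: faster
-- what changed: replaces the O(k) while-loop that accumulates (i-1)^2 with the closed-form formula (k-1)*k*(2k-1)//6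
-- outside the precondition, e.g. on sum_of_sqrs(-3): A returns False, B returns False
import Mathlib
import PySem

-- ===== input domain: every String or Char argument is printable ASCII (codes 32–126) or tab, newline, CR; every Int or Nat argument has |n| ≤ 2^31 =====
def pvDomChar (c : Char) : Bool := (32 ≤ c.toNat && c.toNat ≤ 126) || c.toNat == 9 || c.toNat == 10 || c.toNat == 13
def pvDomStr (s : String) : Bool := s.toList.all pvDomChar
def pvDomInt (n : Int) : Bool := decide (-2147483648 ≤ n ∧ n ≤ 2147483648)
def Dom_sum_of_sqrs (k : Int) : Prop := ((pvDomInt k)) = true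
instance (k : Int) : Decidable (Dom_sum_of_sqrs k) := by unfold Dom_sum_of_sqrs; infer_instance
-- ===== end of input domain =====

-- B replaces A's O(k) accumulation loop with the closed-form formula (k-1)*k*(2k-1)//6.

-- ===== PORT A =====
-- the while-loop of A, counting k down; fuel = k.toNat, state = sqr_sum
def pvA_loop : Nat → Int → Int
  | 0, s => s
  | n + 1, s =>
    let k : Int := (n : Int) + 1
    let count := k - 1
    let count := count * count
    pvA_loop n (s + count)

def sum_of_sqrs (k : Int) : Int :=
  if k ≥ 0 then pvA_loop k.toNat 0 else 0  -- Python returns False (a bool) for k < 0; excluded by Pre_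

-- ===== PORT B =====
def sum_of_sqrs_alt (k : Int) : Int :=
  if k ≥ 0 then PySem.Int.floordiv ((k - 1) * k * (2 * k - 1)) 6 else 0

-- ===== PRECONDITION & SPEC =====
-- Pre_ excludes k < 0, where Python A returns the bool False instead of an int.
def Pre_sum_of_sqrs (k : Int) : Prop := 0 ≤ k
instance (k : Int) : Decidable (Pre_sum_of_sqrs k) := by unfold Pre_sum_of_sqrs; infer_instance
def pvWitness_sum_of_sqrs : Int := 5

def Spec_sum_of_sqrs (k : Int) (out : Int) : Prop := out = sum_of_sqrs_alt k
instance (k : Int) (out : Int) : Decidable (Spec_sum_of_sqrs k out) := by unfold Spec_sum_of_sqrs; infer_instance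

-- ===== CLAIM (what is proved, stated in full; the proofs are below) =====
def Claim_equal_sum_of_sqrs : Prop := ∀ (k : Int), Dom_sum_of_sqrs k → Pre_sum_of_sqrs k → Spec_sum_of_sqrs k (sum_of_sqrs k)

-- ===== LEMMAS AND PROOFS =====
-- A's loop shifted by its accumulator
theorem pvA_loop_acc (n : Nat) (s : Int) : pvA_loop n s = s + pvA_loop n 0 := by
  induction n generalizing s with
  | zero => simp [pvA_loop]
  | succ m ih =>
    simp only [pvA_loop]
    rw [ih, ih (0 + _)]
    ring

theorem pvA_loop_closed (n : Nat) : 6 * pvA_loop n 0 = ((n : Int) - 1) * n * (2 * n - 1) := by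
  induction n with
  | zero => simp [pvA_loop]
  | succ m ih =>
    simp only [pvA_loop]
    rw [pvA_loop_acc]
    push_cast
    push_cast at ih
    ring_nf
    ring_nf at ih
    omega

theorem pvA_loop_eq_floordiv (n : Nat) :
    pvA_loop n 0 = PySem.Int.floordiv (((n : Int) - 1) * n * (2 * n - 1)) 6 := by
  have h := pvA_loop_closed n
  have h6 : (0 : Int) < 6 := by norm_num
  rw [eq_comm, PySem.Int.floordiv_eq_iff_of_pos h6]
  constructor <;> omega

-- ===== VERDICT (by name: the statement is the Claim_ definition above) =====
theorem sum_of_sqrs_spec : Claim_equal_sum_of_sqrs := by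
  intro k _ hk
  have hk' : k ≥ 0 := hk
  unfold Spec_sum_of_sqrs sum_of_sqrs sum_of_sqrs_alt
  rw [if_pos hk', if_pos hk']
  rw [pvA_loop_eq_floordiv]
  have : ((k.toNat : Int)) = k := Int.toNat_of_nonneg hk
  rw [this]
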